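-- pv_equiv track=rewrite | github.com/quantik-git/Laboratorios-Algoritmia-II | treino02/viagem.py | build
-- ===== SOURCE A (Python) =====
-- def build(arestas):
--     adj = {}
--     for o, d, p in arestas:
--         if o not in adj:
--             adj[o] = {}
--         if d not in adj:
--             adj[d] = {}
--
--         if(d in adj[o] and p > adj[o][d]):
--             continue;
--
--         adj[o][d] = p
--         adj[d][o] = p
--     return adj
-- ===== SOURCE B (Python) =====
-- def build(arestas):
--     # Two passes: collect the minimum weight per unordered endpoint pair
--     # (keyed by the pair's first-seen orientation), then expand each pair
--     # symmetrically into the nested adjacency dict.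
--     best = {}
--     for o, d, p in arestas:
--         k = (o, d) if (o, d) in best else (d, o)
--         if k in best:
--             if p <= best[k]:
--                 best[k] = p
--         else:
--             best[(o, d)] = p
--     adj = {}
--     for (o, d), w in best.items():
--         adj.setdefault(o, {})[d] = w
--         adj.setdefault(d, {})[o] = w
--     return adj
-- ===== Notes on version B (the rewrite author's own statement) =====
-- stated objective: alternative
-- what changed: A builds the nested adjacency dict incrementally while scanning edges; B first builds a flat dict mapping each unordered endpoint pair (in first-seen orientation) to its minimum weight, then expands that table symmetrically into the nested dict in a second pass.
import Mathlib
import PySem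

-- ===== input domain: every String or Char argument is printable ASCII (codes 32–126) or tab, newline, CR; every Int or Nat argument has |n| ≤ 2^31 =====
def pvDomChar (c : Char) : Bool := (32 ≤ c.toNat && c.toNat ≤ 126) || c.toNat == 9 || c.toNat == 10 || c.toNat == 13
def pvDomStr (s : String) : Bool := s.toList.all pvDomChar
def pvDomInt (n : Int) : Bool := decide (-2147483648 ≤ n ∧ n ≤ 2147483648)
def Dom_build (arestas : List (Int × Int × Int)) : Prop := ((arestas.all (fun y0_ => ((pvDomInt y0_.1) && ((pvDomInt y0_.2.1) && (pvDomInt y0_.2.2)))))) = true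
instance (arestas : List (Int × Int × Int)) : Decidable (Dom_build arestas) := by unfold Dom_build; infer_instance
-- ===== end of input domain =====

-- B replaces A's single-pass nested-dict updates by two passes: a flat dict mapping each
-- unordered endpoint pair (kept in first-seen orientation) to its minimum weight, then a
-- symmetric expansion of that table into the nested adjacency dict (objective: alternative).

-- ===== PORT A =====
def build (arestas : List (Int × Int × Int)) : List (Int × List (Int × Int)) :=
  let adj := arestas.foldl (fun adj e =>
    let o := e.1
    let d := e.2.1
    let p := e.2.2
    let adj := if adj.contains o then adj else adj.insert o PySem.Dict.empty
    let adj := if adj.contains d then adj else adj.insert d PySem.Dict.empty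
    let ao := adj.getD o PySem.Dict.empty
    if ao.contains d && decide (ao.getD d 0 < p) then adj
    else
      let adj := adj.insert o (ao.insert d p)
      adj.insert d ((adj.getD d PySem.Dict.empty).insert o p))
    (PySem.Dict.empty : PySem.Dict Int (PySem.Dict Int Int))
  adj.items.map (fun kv => (kv.1, kv.2.items))

-- ===== PORT B =====
def build_alt (arestas : List (Int × Int × Int)) : List (Int × List (Int × Int)) :=
  let best := arestas.foldl (fun best e =>
    let o := e.1
    let d := e.2.1
    let p := e.2.2
    let k := if best.contains (o, d) then (o, d) else (d, o)
    if best.contains k then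
      if p ≤ best.getD k 0 then best.insert k p else best
    else
      best.insert (o, d) p)
    (PySem.Dict.empty : PySem.Dict (Int × Int) Int)
  let adj := best.items.foldl (fun adj it =>
    let o := it.1.1
    let d := it.1.2
    let w := it.2
    let a1 := adj.setdefault o PySem.Dict.empty
    let adj := a1.insert o ((a1.getD o PySem.Dict.empty).insert d w)
    let a2 := adj.setdefault d PySem.Dict.empty
    a2.insert d ((a2.getD d PySem.Dict.empty).insert o w))
    (PySem.Dict.empty : PySem.Dict Int (PySem.Dict Int Int))
  adj.items.map (fun kv => (kv.1, kv.2.items))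

-- ===== PRECONDITION & SPEC =====
def Spec_build (arestas : List (Int × Int × Int)) (out : List (Int × List (Int × Int))) : Prop := out = build_alt arestas
instance (arestas : List (Int × Int × Int)) (out : List (Int × List (Int × Int))) : Decidable (Spec_build arestas out) := by unfold Spec_build; infer_instance

-- ===== CLAIM (what is proved, stated in full; the proofs are below) =====
def Claim_equal_build : Prop := ∀ (arestas : List (Int × Int × Int)), Dom_build arestas → Spec_build arestas (build arestas)

-- ===== LEMMAS AND PROOFS =====

-- A's loop body and B's two loop bodies, as named functions (definitionally those of the ports).
def stepA (adj : PySem.Dict Int (PySem.Dict Int Int)) (e : Int × Int × Int) :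
    PySem.Dict Int (PySem.Dict Int Int) :=
  let o := e.1
  let d := e.2.1
  let p := e.2.2
  let adj := if adj.contains o then adj else adj.insert o PySem.Dict.empty
  let adj := if adj.contains d then adj else adj.insert d PySem.Dict.empty
  let ao := adj.getD o PySem.Dict.empty
  if ao.contains d && decide (ao.getD d 0 < p) then adj
  else
    let adj := adj.insert o (ao.insert d p)
    adj.insert d ((adj.getD d PySem.Dict.empty).insert o p)

def stepB (best : PySem.Dict (Int × Int) Int) (e : Int × Int × Int) : PySem.Dict (Int × Int) Int :=
  let o := e.1
  let d := e.2.1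
  let p := e.2.2
  let k := if best.contains (o, d) then (o, d) else (d, o)
  if best.contains k then
    if p ≤ best.getD k 0 then best.insert k p else best
  else
    best.insert (o, d) p

-- "adj.setdefault(o, {})[d] = w"
def ow (adj : PySem.Dict Int (PySem.Dict Int Int)) (o d w : Int) :
    PySem.Dict Int (PySem.Dict Int Int) :=
  let a1 := adj.setdefault o PySem.Dict.empty
  a1.insert o ((a1.getD o PySem.Dict.empty).insert d w)

def gstep2 (adj : PySem.Dict Int (PySem.Dict Int Int)) (it : (Int × Int) × Int) :
    PySem.Dict Int (PySem.Dict Int Int) :=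
  ow (ow adj it.1.1 it.1.2 it.2) it.1.2 it.1.1 it.2

def G (l : List ((Int × Int) × Int)) : PySem.Dict Int (PySem.Dict Int Int) :=
  l.foldl gstep2 PySem.Dict.empty

def lk (adj : PySem.Dict Int (PySem.Dict Int Int)) (x y : Int) : Option Int :=
  (adj.getD x PySem.Dict.empty).get? y

def GoodB (best : PySem.Dict (Int × Int) Int) : Prop :=
  best.keys.Nodup ∧ ∀ x y : Int, (x, y) ∈ best.keys → (y, x) ∈ best.keys → x = y

theorem swap_ne {u v s t : Int} (h : (u, v) ≠ (s, t)) : (v, u) ≠ (t, s) := by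
  intro hh
  apply h
  rw [Prod.ext_iff] at hh ⊢
  exact ⟨hh.2, hh.1⟩

theorem insert_comm_of_contains {κ ν : Type} [BEq κ] [LawfulBEq κ]
    (m : PySem.Dict κ ν) (k k' : κ) (v v' : ν)
    (h : m.contains k = true) (hne : k ≠ k') :
    (m.insert k v).insert k' v' = (m.insert k' v').insert k v := by
  apply PySem.Dict.ext
  have hkk' : (k' == k) = false := by simp [Ne.symm hne]
  have hk'k : (k == k') = false := by simp [hne]
  cases hk' : m.contains k' with
  | false =>
    have h1 : (m.insert k v).contains k' = false := by
      rw [PySem.Dict.contains_insert]; simp [hkk', hk']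
    have h2 : (m.insert k' v').contains k = true := by
      rw [PySem.Dict.contains_insert]; simp [h]
    rw [PySem.Dict.items_insert_of_not_contains _ v' h1,
        PySem.Dict.items_insert_of_contains _ v h,
        PySem.Dict.items_insert_of_contains _ v h2,
        PySem.Dict.items_insert_of_not_contains _ v' hk',
        List.map_append]
    simp [hkk']
  | true =>
    have h1 : (m.insert k v).contains k' = true := by
      rw [PySem.Dict.contains_insert]; simp [hk']
    have h2 : (m.insert k' v').contains k = true := by
      rw [PySem.Dict.contains_insert]; simp [h]
    rw [PySem.Dict.items_insert_of_contains _ v' h1,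
        PySem.Dict.items_insert_of_contains _ v h,
        PySem.Dict.items_insert_of_contains _ v h2,
        PySem.Dict.items_insert_of_contains _ v' hk',
        List.map_map, List.map_map]
    apply List.map_congr_left
    intro q _
    by_cases hp : q.1 = k
    · have hqk : (q.1 == k) = true := by simp [hp]
      have hqk' : (q.1 == k') = false := by simp [hp, hne]
      simp [Function.comp, hqk, hqk', hk'k]
    · by_cases hq : q.1 = k'
      · have hqk : (q.1 == k) = false := by simp [hp]
        have hqk' : (q.1 == k') = true := by simp [hq]
        simp [Function.comp, hqk, hqk', hkk']
      · have hqk : (q.1 == k) = false := by simp [hp]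
        have hqk' : (q.1 == k') = false := by simp [hq]
        simp [Function.comp, hqk, hqk']

theorem sd_insert_self {κ ν : Type} [BEq κ] [LawfulBEq κ]
    (m : PySem.Dict κ ν) (k : κ) (e v : ν) :
    (m.setdefault k e).insert k v = m.insert k v := by
  cases hc : m.contains k with
  | true => rw [PySem.Dict.setdefault_of_contains _ e hc]
  | false => rw [PySem.Dict.setdefault_of_not_contains _ e hc, PySem.Dict.insert_insert_self]

theorem ow_eq (adj : PySem.Dict Int (PySem.Dict Int Int)) (o d w : Int) :
    ow adj o d w = adj.insert o ((adj.getD o PySem.Dict.empty).insert d w) := by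
  simp only [ow]
  cases hc : adj.contains o with
  | true => rw [PySem.Dict.setdefault_of_contains _ _ hc]
  | false =>
    rw [PySem.Dict.setdefault_of_not_contains _ _ hc, PySem.Dict.getD_insert_self,
        PySem.Dict.insert_insert_self, PySem.Dict.getD_of_not_contains _ _ hc]

theorem contains_ow (adj : PySem.Dict Int (PySem.Dict Int Int)) (o d w x : Int) :
    (ow adj o d w).contains x = (x == o || adj.contains x) := by
  rw [ow_eq, PySem.Dict.contains_insert]

theorem lk_ow_self (adj : PySem.Dict Int (PySem.Dict Int Int)) (o d w : Int) :
    lk (ow adj o d w) o d = some w := by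
  rw [lk, ow_eq, PySem.Dict.getD_insert_self, PySem.Dict.get?_insert_self]

theorem lk_ow_ne (adj : PySem.Dict Int (PySem.Dict Int Int)) (o d w x y : Int)
    (h : (x, y) ≠ (o, d)) : lk (ow adj o d w) x y = lk adj x y := by
  by_cases hx : x = o
  · subst hx
    have hy : y ≠ d := by intro hh; exact h (by rw [hh])
    rw [lk, ow_eq, PySem.Dict.getD_insert_self, PySem.Dict.get?_insert_of_ne _ _ hy, lk]
  · rw [lk, ow_eq, PySem.Dict.getD_insert_of_ne _ _ _ hx, lk]

theorem contains_of_lk (adj : PySem.Dict Int (PySem.Dict Int Int)) (o d v : Int)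
    (h : lk adj o d = some v) : adj.contains o = true := by
  cases hc : adj.contains o with
  | true => rfl
  | false =>
    rw [lk, PySem.Dict.getD_of_not_contains _ _ hc, PySem.Dict.get?_empty] at h
    exact absurd h (by simp)

theorem ow_absorb (adj : PySem.Dict Int (PySem.Dict Int Int)) (o d w p : Int) :
    ow (ow adj o d w) o d p = ow adj o d p := by
  rw [ow_eq, ow_eq, ow_eq, PySem.Dict.getD_insert_self, PySem.Dict.insert_insert_self,
      PySem.Dict.insert_insert_self]

theorem ow_comm (adj : PySem.Dict Int (PySem.Dict Int Int)) (o d p x y q : Int)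
    (h : (lk adj o d).isSome) (hne : (x, y) ≠ (o, d)) :
    ow (ow adj o d p) x y q = ow (ow adj x y q) o d p := by
  obtain ⟨v, hv⟩ := Option.isSome_iff_exists.mp h
  have ho : adj.contains o = true := contains_of_lk adj o d v hv
  have hd : (adj.getD o PySem.Dict.empty).contains d = true := by
    rw [PySem.Dict.contains_eq_isSome_get?]
    rw [lk] at hv
    rw [hv]; rfl
  by_cases hx : x = o
  · subst hx
    have hy : y ≠ d := by intro hh; exact hne (by rw [hh])
    rw [ow_eq, ow_eq, ow_eq, ow_eq, PySem.Dict.getD_insert_self, PySem.Dict.getD_insert_self,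
        PySem.Dict.insert_insert_self, PySem.Dict.insert_insert_self]
    congr 1
    exact insert_comm_of_contains _ d y p q hd (Ne.symm hy)
  · rw [ow_eq, ow_eq, ow_eq, ow_eq, PySem.Dict.getD_insert_of_ne _ _ _ hx,
        PySem.Dict.getD_insert_of_ne _ _ _ (fun hh => hx hh.symm)]
    exact insert_comm_of_contains adj o x _ _ ho (fun hh => hx hh.symm)

theorem ow_slot_pres (adj : PySem.Dict Int (PySem.Dict Int Int)) (o d w a b : Int)
    (h : (lk adj a b).isSome) : (lk (ow adj o d w) a b).isSome := by
  by_cases hab : (a, b) = (o, d)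
  · have h1 : a = o := congrArg Prod.fst hab
    have h2 : b = d := congrArg Prod.snd hab
    subst h1; subst h2
    rw [lk_ow_self]; rfl
  · rw [lk_ow_ne _ _ _ _ _ _ hab]; exact h

theorem sd_ow_comm (adj : PySem.Dict Int (PySem.Dict Int Int)) (a o d p : Int)
    (h : adj.contains o = true) :
    ow (adj.setdefault a PySem.Dict.empty) o d p
      = (ow adj o d p).setdefault a PySem.Dict.empty := by
  cases ha : adj.contains a with
  | true =>
    rw [PySem.Dict.setdefault_of_contains _ _ ha,
        PySem.Dict.setdefault_of_contains _ _ (by rw [contains_ow]; simp [ha])]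
  | false =>
    have hao : a ≠ o := by intro hh; rw [hh] at ha; rw [h] at ha; cases ha
    rw [PySem.Dict.setdefault_of_not_contains _ _ ha,
        PySem.Dict.setdefault_of_not_contains _ _ (by rw [contains_ow]; simp [ha, hao]),
        ow_eq, ow_eq, PySem.Dict.getD_insert_of_ne _ _ _ (Ne.symm hao)]
    exact (insert_comm_of_contains adj o a _ _ h (Ne.symm hao)).symm

theorem sd_ow_absorb (adj : PySem.Dict Int (PySem.Dict Int Int)) (o d p : Int) :
    ow (adj.setdefault o PySem.Dict.empty) o d p = ow adj o d p := by
  rw [ow_eq, ow_eq, PySem.Dict.getD_setdefault_self, sd_insert_self]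

theorem lk_sd (adj : PySem.Dict Int (PySem.Dict Int Int)) (a x y : Int) :
    lk (adj.setdefault a PySem.Dict.empty) x y = lk adj x y := by
  by_cases hx : x = a
  · subst hx; rw [lk, PySem.Dict.getD_setdefault_self, lk]
  · rw [lk, PySem.Dict.getD_eq_get?_getD, PySem.Dict.get?_setdefault_of_ne _ _ hx,
        ← PySem.Dict.getD_eq_get?_getD, lk]

theorem lk_gstep2_self₁ (adj : PySem.Dict Int (PySem.Dict Int Int)) (a b w : Int) :
    lk (gstep2 adj ((a, b), w)) a b = some w := by
  by_cases hab : a = b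
  · subst hab; exact lk_ow_self _ _ _ _
  · rw [gstep2]
    rw [lk_ow_ne _ _ _ _ _ _ (by simp [hab]), lk_ow_self]

theorem lk_gstep2_self₂ (adj : PySem.Dict Int (PySem.Dict Int Int)) (a b w : Int) :
    lk (gstep2 adj ((a, b), w)) b a = some w := lk_ow_self _ _ _ _

theorem lk_gstep2_ne (adj : PySem.Dict Int (PySem.Dict Int Int)) (a b w x y : Int)
    (h1 : (x, y) ≠ (a, b)) (h2 : (x, y) ≠ (b, a)) :
    lk (gstep2 adj ((a, b), w)) x y = lk adj x y := by
  rw [gstep2]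
  rw [lk_ow_ne _ _ _ _ _ _ h2, lk_ow_ne _ _ _ _ _ _ h1]

theorem gstep2_slot_pres (adj : PySem.Dict Int (PySem.Dict Int Int)) (e : (Int × Int) × Int)
    (a b : Int) (h : (lk adj a b).isSome) : (lk (gstep2 adj e) a b).isSome := by
  rw [gstep2]
  exact ow_slot_pres _ _ _ _ _ _ (ow_slot_pres _ _ _ _ _ _ h)

theorem gstep2_absorb (adj : PySem.Dict Int (PySem.Dict Int Int)) (a b w p : Int) :
    gstep2 (gstep2 adj ((a, b), w)) ((a, b), p) = gstep2 adj ((a, b), p) := by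
  by_cases hab : a = b
  · subst hab; simp [gstep2, ow_absorb]
  · have hslot : (lk (ow adj a b w) a b).isSome := by rw [lk_ow_self]; rfl
    have hne : ((b, a) : Int × Int) ≠ (a, b) := by simp [hab]
    show ow (ow (ow (ow adj a b w) b a w) a b p) b a p = ow (ow adj a b p) b a p
    rw [← ow_comm (ow adj a b w) a b p b a w hslot hne, ow_absorb, ow_absorb]

theorem gstep2_comm (adj : PySem.Dict Int (PySem.Dict Int Int)) (a b p x y q : Int)
    (h1 : (lk adj a b).isSome) (h2 : (lk adj b a).isSome)
    (hx : (x, y) ≠ (a, b)) (hy : (x, y) ≠ (b, a)) :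
    gstep2 (gstep2 adj ((a, b), p)) ((x, y), q) = gstep2 (gstep2 adj ((x, y), q)) ((a, b), p) := by
  show ow (ow (ow (ow adj a b p) b a p) x y q) y x q
      = ow (ow (ow (ow adj x y q) y x q) a b p) b a p
  have h2' : (lk (ow adj a b p) b a).isSome := ow_slot_pres _ _ _ _ _ _ h2
  rw [ow_comm (ow adj a b p) b a p x y q h2' hy,
      ow_comm adj a b p x y q h1 hx]
  have h2'' : (lk (ow (ow adj x y q) a b p) b a).isSome :=
    ow_slot_pres _ _ _ _ _ _ (ow_slot_pres _ _ _ _ _ _ h2)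
  rw [ow_comm (ow (ow adj x y q) a b p) b a p y x q h2'' (swap_ne hx),
      ow_comm (ow adj x y q) a b p y x q (ow_slot_pres _ _ _ _ _ _ h1) (swap_ne hy)]

theorem gstep2_ori (adj : PySem.Dict Int (PySem.Dict Int Int)) (a b p : Int)
    (h1 : (lk adj a b).isSome) (h2 : (lk adj b a).isSome) :
    gstep2 adj ((b, a), p) = gstep2 adj ((a, b), p) := by
  by_cases hab : a = b
  · subst hab; rfl
  · show ow (ow adj b a p) a b p = ow (ow adj a b p) b a p
    exact (ow_comm adj a b p b a p h1 (by simp [hab])).symm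

theorem pull_through (a b p : Int) (l2 : List ((Int × Int) × Int))
    (hfree : ∀ e ∈ l2, e.1 ≠ (a, b) ∧ e.1 ≠ (b, a)) :
    ∀ adj, (lk adj a b).isSome → (lk adj b a).isSome →
    List.foldl gstep2 (gstep2 adj ((a, b), p)) l2
      = gstep2 (List.foldl gstep2 adj l2) ((a, b), p) := by
  induction l2 with
  | nil => intro adj _ _; rfl
  | cons u t ih =>
    intro adj h1 h2
    obtain ⟨⟨x, y⟩, q⟩ := u
    obtain ⟨hx, hy⟩ := hfree _ (List.mem_cons_self ..)
    simp only [List.foldl_cons]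
    rw [gstep2_comm adj a b p x y q h1 h2 hx hy]
    exact ih (fun e he => hfree e (List.mem_cons_of_mem _ he)) (gstep2 adj ((x, y), q))
      (gstep2_slot_pres _ _ _ _ h1) (gstep2_slot_pres _ _ _ _ h2)

theorem lk_foldl_frame (x y : Int) (l : List ((Int × Int) × Int))
    (hfree : ∀ e ∈ l, e.1 ≠ (x, y) ∧ e.1 ≠ (y, x)) :
    ∀ adj, lk (List.foldl gstep2 adj l) x y = lk adj x y := by
  induction l with
  | nil => intro adj; rfl
  | cons u t ih =>
    intro adj
    obtain ⟨⟨a, b⟩, w⟩ := u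
    obtain ⟨h1, h2⟩ := hfree _ (List.mem_cons_self ..)
    simp only [List.foldl_cons]
    rw [ih (fun e he => hfree e (List.mem_cons_of_mem _ he)),
        lk_gstep2_ne _ _ _ _ _ _ (Ne.symm h1) (Ne.symm (swap_ne h2))]

theorem ensure_eq_sd (X : PySem.Dict Int (PySem.Dict Int Int)) (k : Int) :
    (if X.contains k then X else X.insert k PySem.Dict.empty)
      = X.setdefault k PySem.Dict.empty := by
  cases hc : X.contains k with
  | true => rw [if_pos rfl, PySem.Dict.setdefault_of_contains _ _ hc]
  | false => rw [if_neg (by simp), PySem.Dict.setdefault_of_not_contains _ _ hc]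

theorem stepA_skip (adj : PySem.Dict Int (PySem.Dict Int Int)) (o d p v : Int)
    (h : lk adj o d = some v) (hv : v < p) :
    stepA adj (o, d, p) = (adj.setdefault o PySem.Dict.empty).setdefault d PySem.Dict.empty := by
  simp only [stepA, ensure_eq_sd]
  have hlk : lk ((adj.setdefault o PySem.Dict.empty).setdefault d PySem.Dict.empty) o d
      = some v := by rw [lk_sd, lk_sd]; exact h
  rw [lk] at hlk
  have hcd : (((adj.setdefault o PySem.Dict.empty).setdefault d PySem.Dict.empty).getD o
      PySem.Dict.empty).contains d = true := by
    rw [PySem.Dict.contains_eq_isSome_get?, hlk]; rfl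
  rw [hcd, PySem.Dict.getD_of_get?_eq_some _ _ hlk]
  simp [hv]

theorem stepA_write (adj : PySem.Dict Int (PySem.Dict Int Int)) (o d p : Int)
    (h : ∀ v, lk adj o d = some v → p ≤ v) :
    stepA adj (o, d, p) = gstep2 adj ((o, d), p) := by
  simp only [stepA, ensure_eq_sd]
  have hlk : lk ((adj.setdefault o PySem.Dict.empty).setdefault d PySem.Dict.empty) o d
      = lk adj o d := by rw [lk_sd, lk_sd]
  rw [lk] at hlk
  have hcond : ((((adj.setdefault o PySem.Dict.empty).setdefault d PySem.Dict.empty).getD o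
      PySem.Dict.empty).contains d
      && decide ((((adj.setdefault o PySem.Dict.empty).setdefault d PySem.Dict.empty).getD o
        PySem.Dict.empty).getD d 0 < p)) = false := by
    cases hl : lk adj o d with
    | none =>
      have : (((adj.setdefault o PySem.Dict.empty).setdefault d PySem.Dict.empty).getD o
          PySem.Dict.empty).contains d = false := by
        rw [PySem.Dict.contains_eq_isSome_get?, hlk, lk] at *
        rw [hl]; rfl
      rw [this]; rfl
    | some v =>
      have hpv := h v hl
      rw [lk] at hl
      rw [PySem.Dict.getD_of_get?_eq_some _ _ (hlk.trans hl)]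
      simp [not_lt.mpr hpv]
  rw [hcond]
  simp only [Bool.false_eq_true, if_false]
  rw [← ow_eq, ← ow_eq]
  rw [sd_ow_comm _ d o d p (by rw [PySem.Dict.contains_setdefault]; simp),
      sd_ow_absorb, sd_ow_absorb]
  rfl

-- decomposition of a Good dict around a present key
theorem good_decomp (best : PySem.Dict (Int × Int) Int) (hg : GoodB best)
    (k1 k2 : Int) (w : Int) (hget : best.get? (k1, k2) = some w) :
    ∃ l1 l2, best.items = l1 ++ ((k1, k2), w) :: l2 ∧
      (∀ e ∈ l1, e.1 ≠ (k1, k2) ∧ e.1 ≠ (k2, k1)) ∧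
      (∀ e ∈ l2, e.1 ≠ (k1, k2) ∧ e.1 ≠ (k2, k1)) := by
  obtain ⟨l1, l2, hl⟩ := List.append_of_mem (PySem.Dict.mem_items_of_get?_eq_some best hget)
  have hnd := hg.1
  rw [show best.keys = best.items.map Prod.fst from rfl, hl] at hnd
  simp only [List.map_append, List.map_cons, List.nodup_append, List.nodup_cons] at hnd
  have h1 : (k1, k2) ∉ l1.map Prod.fst :=
    fun hmem => hnd.2.2 (k1, k2) hmem (k1, k2) List.mem_cons_self rfl
  have h2 : (k1, k2) ∉ l2.map Prod.fst := hnd.2.1.1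
  have main : ∀ e, e ∈ l1 ++ l2 → e.1 ≠ (k1, k2) ∧ e.1 ≠ (k2, k1) := by
    intro e he
    have hene : e.1 ≠ (k1, k2) := by
      intro hh
      rcases List.mem_append.mp he with h' | h'
      · exact h1 (hh ▸ List.mem_map_of_mem h')
      · exact h2 (hh ▸ List.mem_map_of_mem h')
    refine ⟨hene, fun hh => ?_⟩
    have hein : e ∈ best.items := by
      rw [hl]
      rcases List.mem_append.mp he with h' | h'
      · exact List.mem_append_left _ h'
      · exact List.mem_append_right _ (List.mem_cons_of_mem _ h')
    have hswap : (k2, k1) ∈ best.keys := hh ▸ PySem.Dict.mem_keys_of_mem_items best hein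
    have hkqm : (k1, k2) ∈ best.keys :=
      PySem.Dict.mem_keys_of_mem_items best (PySem.Dict.mem_items_of_get?_eq_some best hget)
    have heq : k1 = k2 := hg.2 k1 k2 hkqm hswap
    exact hene (by rw [hh, heq])
  exact ⟨l1, l2, hl,
    fun e he => main e (List.mem_append_left _ he),
    fun e he => main e (List.mem_append_right _ he)⟩

-- the A-side step against the B-side table, around a present pair
theorem case2 (best : PySem.Dict (Int × Int) Int) (hg : GoodB best)
    (o d p k1 k2 : Int) (hk : (k1, k2) = (o, d) ∨ (k1, k2) = (d, o)) (w : Int)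
    (hget : best.get? (k1, k2) = some w) :
    (w < p → stepA (G best.items) (o, d, p) = G best.items) ∧
    (p ≤ w → stepA (G best.items) (o, d, p) = G ((best.insert (k1, k2) p).items)) := by
  obtain ⟨l1, l2, hl, hf1, hf2⟩ := good_decomp best hg k1 k2 w hget
  have hGsplit : G best.items = List.foldl gstep2 (gstep2 (G l1) ((k1, k2), w)) l2 := by
    rw [hl, G, List.foldl_append, List.foldl_cons]; rfl
  have hlk1 : lk (G best.items) k1 k2 = some w := by
    rw [hGsplit, lk_foldl_frame _ _ _ hf2, lk_gstep2_self₁]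
  have hlk2 : lk (G best.items) k2 k1 = some w := by
    rw [hGsplit, lk_foldl_frame _ _ _ (fun e he => ⟨(hf2 e he).2, (hf2 e he).1⟩),
        lk_gstep2_self₂]
  have hlkod : lk (G best.items) o d = some w := by
    rcases hk with hk' | hk' <;>
    · have e1 := congrArg Prod.fst hk'
      have e2 := congrArg Prod.snd hk'
      simp only at e1 e2
      subst e1; subst e2
      first | exact hlk1 | exact hlk2
  have hlkdo : lk (G best.items) d o = some w := by
    rcases hk with hk' | hk' <;>
    · have e1 := congrArg Prod.fst hk'
      have e2 := congrArg Prod.snd hk'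
      simp only at e1 e2
      subst e1; subst e2
      first | exact hlk2 | exact hlk1
  have hcont_o : (G best.items).contains o = true := contains_of_lk _ _ _ _ hlkod
  have hcont_d : (G best.items).contains d = true := contains_of_lk _ _ _ _ hlkdo
  constructor
  · intro hwp
    rw [stepA_skip _ o d p w hlkod hwp,
        PySem.Dict.setdefault_of_contains _ _ hcont_o,
        PySem.Dict.setdefault_of_contains _ _ hcont_d]
  · intro hpw
    have hA : stepA (G best.items) (o, d, p) = gstep2 (G best.items) ((o, d), p) :=
      stepA_write _ o d p (fun v hv => by rw [hlkod] at hv; injection hv with hv; omega)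
    have hcont : best.contains (k1, k2) = true := by
      rw [PySem.Dict.contains_eq_isSome_get?, hget]; rfl
    have hitems : (best.insert (k1, k2) p).items = l1 ++ ((k1, k2), p) :: l2 := by
      rw [PySem.Dict.items_insert_of_contains _ p hcont, hl, List.map_append, List.map_cons]
      congr 1
      · refine (List.map_congr_left ?_).trans (List.map_id _)
        intro q hq
        simp [(hf1 q hq).1]
      · congr 1
        · simp
        · refine (List.map_congr_left ?_).trans (List.map_id _)
          intro q hq
          simp [(hf2 q hq).1]
    have hslot1 : (lk (gstep2 (G l1) ((k1, k2), w)) k1 k2).isSome := by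
      rw [lk_gstep2_self₁]; rfl
    have hslot2 : (lk (gstep2 (G l1) ((k1, k2), w)) k2 k1).isSome := by
      rw [lk_gstep2_self₂]; rfl
    have hB : G ((best.insert (k1, k2) p).items) = gstep2 (G best.items) ((k1, k2), p) := by
      have hsplit2 : G (l1 ++ ((k1, k2), p) :: l2)
          = List.foldl gstep2 (gstep2 (G l1) ((k1, k2), p)) l2 := by
        rw [G, List.foldl_append]; rfl
      rw [hitems, hsplit2,
          show gstep2 (G l1) ((k1, k2), p)
              = gstep2 (gstep2 (G l1) ((k1, k2), w)) ((k1, k2), p) from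
            (gstep2_absorb _ k1 k2 w p).symm,
          pull_through k1 k2 p l2 hf2 (gstep2 (G l1) ((k1, k2), w)) hslot1 hslot2, ← hGsplit]
    rw [hA, hB]
    rcases hk with hk' | hk'
    · have e1 := congrArg Prod.fst hk'
      have e2 := congrArg Prod.snd hk'
      simp only at e1 e2
      subst e1; subst e2
      rfl
    · have e1 := congrArg Prod.fst hk'
      have e2 := congrArg Prod.snd hk'
      simp only at e1 e2
      subst e1; subst e2
      exact gstep2_ori (G best.items) k1 k2 p (by rw [hlk1]; rfl) (by rw [hlk2]; rfl)

theorem step_sim (best : PySem.Dict (Int × Int) Int) (e : Int × Int × Int)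
    (hg : GoodB best) :
    stepA (G best.items) e = G (stepB best e).items ∧ GoodB (stepB best e) := by
  obtain ⟨o, d, p⟩ := e
  cases hod : best.contains (o, d) with
  | true =>
    obtain ⟨w, hget⟩ : ∃ w, best.get? (o, d) = some w := by
      rw [PySem.Dict.contains_eq_isSome_get?] at hod
      exact Option.isSome_iff_exists.mp hod
    have hc2 := case2 best hg o d p o d (Or.inl rfl) w hget
    simp only [stepB, hod, if_true, PySem.Dict.getD_of_get?_eq_some _ _ hget]
    by_cases hpw : p ≤ w
    · rw [if_pos hpw]
      refine ⟨hc2.2 hpw, ?_⟩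
      refine ⟨?_, ?_⟩
      · rw [PySem.Dict.keys_insert_of_contains _ p hod]; exact hg.1
      · rw [PySem.Dict.keys_insert_of_contains _ p hod]; exact hg.2
    · rw [if_neg hpw]
      exact ⟨hc2.1 (by omega), hg⟩
  | false =>
    cases hdo : best.contains (d, o) with
    | true =>
      obtain ⟨w, hget⟩ : ∃ w, best.get? (d, o) = some w := by
        rw [PySem.Dict.contains_eq_isSome_get?] at hdo
        exact Option.isSome_iff_exists.mp hdo
      have hc2 := case2 best hg o d p d o (Or.inr rfl) w hget
      simp only [stepB, hod, Bool.false_eq_true, if_false, hdo, if_true,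
        PySem.Dict.getD_of_get?_eq_some _ _ hget]
      by_cases hpw : p ≤ w
      · rw [if_pos hpw]
        refine ⟨hc2.2 hpw, ?_⟩
        refine ⟨?_, ?_⟩
        · rw [PySem.Dict.keys_insert_of_contains _ p hdo]; exact hg.1
        · rw [PySem.Dict.keys_insert_of_contains _ p hdo]; exact hg.2
      · rw [if_neg hpw]
        exact ⟨hc2.1 (by omega), hg⟩
    | false =>
      simp only [stepB, hod, Bool.false_eq_true, if_false, hdo]
      have hnot_od : (o, d) ∉ best.keys := by
        have hod' := hod
        rw [PySem.Dict.contains_eq_decide_mem_keys] at hod'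
        simpa using hod'
      have hnot_do : (d, o) ∉ best.keys := by
        have hdo' := hdo
        rw [PySem.Dict.contains_eq_decide_mem_keys] at hdo'
        simpa using hdo'
      have hfree : ∀ e ∈ best.items, e.1 ≠ (o, d) ∧ e.1 ≠ (d, o) := by
        intro e he
        constructor <;> intro hh
        · exact hnot_od (hh ▸ PySem.Dict.mem_keys_of_mem_items best he)
        · exact hnot_do (hh ▸ PySem.Dict.mem_keys_of_mem_items best he)
      have hlknone : lk (G best.items) o d = none := by
        rw [G, lk_foldl_frame _ _ _ hfree, lk, PySem.Dict.getD_empty, PySem.Dict.get?_empty]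
      constructor
      · rw [stepA_write _ o d p (fun v hv => by rw [hlknone] at hv; cases hv),
            PySem.Dict.items_insert_of_not_contains _ p hod]
        show gstep2 (G best.items) ((o, d), p) = G (best.items ++ [((o, d), p)])
        rw [G, G, List.foldl_append]
        rfl
      · refine ⟨PySem.Dict.nodup_keys_insert _ _ _ hg.1, ?_⟩
        intro x y hx hy
        rw [PySem.Dict.keys_insert_of_not_contains _ p hod] at hx hy
        rcases List.mem_append.mp hx with hx' | hx' <;>
          rcases List.mem_append.mp hy with hy' | hy'
        · exact hg.2 x y hx' hy'
        · obtain ⟨hy1, hy2⟩ : y = o ∧ x = d := by simpa using hy'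
          subst hy1; subst hy2
          exact absurd hx' hnot_do
        · obtain ⟨hx1, hx2⟩ : x = o ∧ y = d := by simpa using hx'
          subst hx1; subst hx2
          exact absurd hy' hnot_do
        · obtain ⟨hx1, hx2⟩ : x = o ∧ y = d := by simpa using hx'
          obtain ⟨hy1, hy2⟩ : y = o ∧ x = d := by simpa using hy'
          omega

theorem fold_sim (es : List (Int × Int × Int)) :
    ∀ best, GoodB best →
      List.foldl stepA (G best.items) es = G ((List.foldl stepB best es).items) ∧
      GoodB (List.foldl stepB best es) := by
  induction es with
  | nil => intro best hg; exact ⟨rfl, hg⟩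
  | cons e es ih =>
    intro best hg
    obtain ⟨h1, h2⟩ := step_sim best e hg
    obtain ⟨h3, h4⟩ := ih (stepB best e) h2
    simp only [List.foldl_cons]
    exact ⟨by rw [h1]; exact h3, h4⟩

-- ===== VERDICT (by name: the statement is the Claim_ definition above) =====
theorem build_spec : Claim_equal_build := by
  intro arestas _
  show build arestas = build_alt arestas
  have hg : GoodB (PySem.Dict.empty : PySem.Dict (Int × Int) Int) := by
    constructor
    · exact PySem.Dict.nodup_keys_empty
    · intro x y hx _
      rw [PySem.Dict.keys_empty] at hx
      cases hx
  obtain ⟨h1, _⟩ := fold_sim arestas PySem.Dict.empty hg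
  exact congrArg (fun dd : PySem.Dict Int (PySem.Dict Int Int) =>
    dd.items.map (fun kv => (kv.1, kv.2.items))) h1
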